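-- pv_equiv track=rewrite | github.com/leedohyung28/Baekjoon | 프로그래머스/4/17685. ［3차］ 자동완성/［3차］ 자동완성.py | solution
-- ===== SOURCE A (Python) =====
-- def solution(words):
--     words.sort()
--
--     answer = 0
--
--     g = False
--     for j in range(min(len(words[0]), len(words[1]))) :
--         if words[0][j] != words[1][j] :
--             answer = j+1
--             last = words[0][:j+1]
--             g = True
--             break
--     if not g :
--         if len(words[0]) > len(words[1]) :
--             answer = len(words[1]) + 1
--             last = words[0][:len(words[1])+1]
--         else :
--             answer = len(words[0])
--             last = words[0]
--
--     for i in range(1, len(words)-1) :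
--         l = False
--         r = False
--         g = False
--         for j in range(len(words[i])) :
--             if not l and j < len(last) :
--                 if last[j] != words[i][j] :
--                     l = True
--
--             if not r and j < len(words[i+1]) :
--                 if words[i+1][j] != words[i][j] :
--                     r = True
--
--             if l and r :
--                 last = words[i][:j+1]
--                 answer += j+1
--                 g = True
--                 break
--
--             if j == len(last)-1 :
--                     l = True
--             if j == len(words[i+1])-1 :
--                     r = True
--         if not g :
--             last = words[i]
--             answer += len(words[i])
--
--     g = False
--     for j in range(min(len(words[-1]), len(last))) :
--         if words[-1][j] != last[j] :
--             answer += j+1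
--             g = True
--             break
--     if not g :
--         if len(words[-1]) > len(last) :
--             answer += len(last) + 1
--         else :
--             answer += len(words[-1])
--
--     return answer
-- ===== SOURCE B (Python) =====
-- def _lcp(a, b):
--     i = 0
--     while i < len(a) and i < len(b) and a[i] == b[i]:
--         i += 1
--     return i
--
-- def solution(words):
--     ws = sorted(words)
--     n = len(ws)
--     total = 0
--     for i, w in enumerate(ws):
--         left = _lcp(ws[i - 1], w) if i > 0 else 0
--         right = _lcp(w, ws[i + 1]) if i + 1 < n else 0
--         total += min(len(w), 1 + max(left, right))
--     return total
-- ===== Notes on version B (the rewrite author's own statement) =====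
-- stated objective: simpler
-- what changed: A's stateful scan (a remembered `last` typed-prefix plus l/r flag machinery advanced character by character with early breaks) is replaced by: sort, then one pass summing the per-word closed formula min(len(w), 1+max(lcp_left, lcp_right)) over adjacent longest-common-prefix lengths; …
-- outside the precondition, e.g. on solution(['', 'ab', 'b']): A returns 3, B returns 2; on solution(['go']): A raises IndexError, B returns 1; on solution([]): A raises IndexError, B returns 0
import Mathlib
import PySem

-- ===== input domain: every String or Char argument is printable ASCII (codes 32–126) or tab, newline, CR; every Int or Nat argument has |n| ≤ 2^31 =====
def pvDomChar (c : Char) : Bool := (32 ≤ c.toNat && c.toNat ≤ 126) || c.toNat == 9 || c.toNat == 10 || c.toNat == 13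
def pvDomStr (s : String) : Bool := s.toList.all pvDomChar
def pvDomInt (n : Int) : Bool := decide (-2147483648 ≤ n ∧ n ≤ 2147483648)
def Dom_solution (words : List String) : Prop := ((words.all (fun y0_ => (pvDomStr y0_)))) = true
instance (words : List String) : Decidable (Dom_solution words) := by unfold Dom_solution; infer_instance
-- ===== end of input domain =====

-- B replaces A's stateful per-character flag machine with one pass over the sorted list summing a
-- per-word closed formula from the adjacent longest-common-prefix lengths (objective: simpler; no
-- speed claim). Python A sorts `words` in place; B does not mutate — the claim is about the return
-- value only.

-- ===== PORT A =====
def pvMismatch (a b : List Char) (j : Nat) : Option Nat :=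
  if h : j < min a.length b.length then
    (if a.getD j ' ' ≠ b.getD j ' ' then some j else pvMismatch a b (j+1))
  else none
termination_by min a.length b.length - j


def pvInner (last cur next : List Char) (j : Nat) (l r : Bool) : Option Nat :=
  if hj : j < cur.length then
    let l1 := if !l && decide (j < last.length) then
                (if last.getD j ' ' ≠ cur.getD j ' ' then true else l) else l
    let r1 := if !r && decide (j < next.length) then
                (if next.getD j ' ' ≠ cur.getD j ' ' then true else r) else r
    if l1 && r1 then some j
    else
      let l2 := if (j : Int) = (last.length : Int) - 1 then true else l1
      let r2 := if (j : Int) = (next.length : Int) - 1 then true else r1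
      pvInner last cur next (j+1) l2 r2
  else none
termination_by cur.length - j


def pvMiddle (last : List Char) (acc : Int) (rest : List (List Char)) : Int × List Char × List Char :=
  match rest with
  | cur :: next :: r =>
      match pvInner last cur next 0 false false with
      | some j => pvMiddle (cur.take (j+1)) (acc + ((j : Int) + 1)) (next :: r)
      | none   => pvMiddle cur (acc + (cur.length : Int)) (next :: r)
  | [w] => (acc, last, w)
  | [] => (acc, last, [])


def pvFinal (acc : Int) (last w : List Char) : Int :=
  match pvMismatch w last 0 with
  | some j => acc + (j : Int) + 1
  | none => if w.length > last.length then acc + (last.length : Int) + 1 else acc + (w.length : Int)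


def solution (words : List String) : Int :=
  let ws := (@PySem.List.sorted String (List Char) List.instLinearOrder.toLT LinearOrder.toDecidableLT words (fun w => w.toList) false).map String.toList
  match ws with
  | w0 :: w1 :: rest =>
      let fb : Int × List Char :=
        match pvMismatch w0 w1 0 with
        | some j => ((j : Int) + 1, w0.take (j+1))
        | none =>
            if w0.length > w1.length then ((w1.length : Int) + 1, w0.take (w1.length + 1))
            else ((w0.length : Int), w0)
      let m := pvMiddle fb.2 fb.1 (w1 :: rest)
      pvFinal m.1 m.2.1 m.2.2
  | [] => 0   -- Python raises IndexError here (outside Pre_solution)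
  | [_] => 0  -- Python raises IndexError here (outside Pre_solution)


-- ===== PORT B =====
-- Source B's _lcp while-loop as the structural recursion over the same parallel scan
def pvLcp (a b : List Char) : Nat :=
  match a, b with
  | x :: xs, y :: ys => if x = y then pvLcp xs ys + 1 else 0
  | _, _ => 0


-- the for-loop over enumerate(ws): one term per word, carrying the predecessor
def pvSum : Option (List Char) → List (List Char) → Int
  | _, [] => 0
  | prevOpt, w :: rest =>
      let left : Nat := match prevOpt with | some p => pvLcp p w | none => 0
      let right : Nat := match rest with | next :: _ => pvLcp w next | [] => 0
      ((min w.length (1 + max left right) : Nat) : Int) + pvSum (some w) rest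

def solution_alt (words : List String) : Int :=
  let ws := (@PySem.List.sorted String (List Char) List.instLinearOrder.toLT LinearOrder.toDecidableLT words (fun w => w.toList) false).map String.toList
  pvSum none ws

-- ===== PRECONDITION & SPEC =====
-- helpers for Pre_ only (not port code): common-prefix length via zip/takeWhile, and the
-- shape condition on the sorted list
def pvPreLcp (a b : List Char) : Nat := ((a.zip b).takeWhile (fun p => p.1 == p.2)).length

def pvOkB : List (List Char) → Bool
  | [] => true
  | [_] => true
  | c :: next :: r =>
      if c = [] then pvOkB (next :: r)
      else decide (c.length ≤ 1 + pvPreLcp c next)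

-- Pre_ excludes lists of fewer than two words (A unconditionally indexes words[1] and raises
-- IndexError) and lists whose sorted order starts with the empty string while the first nonempty
-- word has a successor and extends their common prefix by more than one character — a corner the
-- autocomplete problem never specifies (the empty word matches every typed prefix), where A's
-- type-the-whole-word count and B's one-past-the-shared-prefix count are both defensible.
def Pre_solution (words : List String) : Prop :=
  2 ≤ words.length ∧
  (((@PySem.List.sorted String (List Char) List.instLinearOrder.toLT LinearOrder.toDecidableLT words (fun w => w.toList) false).map String.toList).head? = some [] →
    pvOkB (((@PySem.List.sorted String (List Char) List.instLinearOrder.toLT LinearOrder.toDecidableLT words (fun w => w.toList) false).map String.toList).tail) = true)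
instance (words : List String) : Decidable (Pre_solution words) := by unfold Pre_solution; infer_instance
def pvWitness_solution : List String := ["go", "gone", "guild"]

def Spec_solution (words : List String) (out : Int) : Prop := out = solution_alt words
instance (words : List String) (out : Int) : Decidable (Spec_solution words out) := by unfold Spec_solution; infer_instance

-- ===== CLAIM (what is proved, stated in full; the proofs are below) =====
def Claim_equal_solution : Prop := ∀ (words : List String), Dom_solution words → Pre_solution words → Spec_solution words (solution words)

-- ===== LEMMAS AND PROOFS =====
theorem pvLcp_nil_left (b : List Char) : pvLcp [] b = 0 := by cases b <;> rfl

theorem pvLcp_nil_right (a : List Char) : pvLcp a [] = 0 := by cases a <;> rfl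


theorem pvLcp_comm (a b : List Char) : pvLcp a b = pvLcp b a := by
  induction a generalizing b with
  | nil => rw [pvLcp_nil_left, pvLcp_nil_right]
  | cons x xs ih =>
      cases b with
      | nil => rfl
      | cons y ys =>
          simp only [pvLcp]
          rcases eq_or_ne x y with h | h
          · simp [h, ih]
          · simp [h, Ne.symm h]


theorem pvLcp_le_left (a b : List Char) : pvLcp a b ≤ a.length := by
  induction a generalizing b with
  | nil => simp [pvLcp_nil_left]
  | cons x xs ih =>
      cases b with
      | nil => simp [pvLcp_nil_right]
      | cons y ys =>
          simp only [pvLcp]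
          split_ifs
          · simpa using ih ys
          · simp


theorem pvLcp_le_right (a b : List Char) : pvLcp a b ≤ b.length := by
  rw [pvLcp_comm]; exact pvLcp_le_left b a


theorem pvLcp_getD_eq (a b : List Char) (j : Nat) (h : j < pvLcp a b) :
    a.getD j ' ' = b.getD j ' ' := by
  induction a generalizing b j with
  | nil => simp [pvLcp_nil_left] at h
  | cons x xs ih =>
      cases b with
      | nil => simp [pvLcp_nil_right] at h
      | cons y ys =>
          simp only [pvLcp] at h
          by_cases hxy : x = y
          · cases j with
            | zero => simpa using hxy
            | succ j' =>
                simp only [hxy, if_true] at h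
                simpa using ih ys j' (by omega)
          · simp [hxy] at h


theorem pvLcp_getD_ne (a b : List Char) (ha : pvLcp a b < a.length) (hb : pvLcp a b < b.length) :
    a.getD (pvLcp a b) ' ' ≠ b.getD (pvLcp a b) ' ' := by
  induction a generalizing b with
  | nil => simp at ha
  | cons x xs ih =>
      cases b with
      | nil => simp at hb
      | cons y ys =>
          by_cases hxy : x = y
          · subst hxy
            simp only [pvLcp, if_true] at ha hb ⊢
            simp only [List.length_cons] at ha hb
            simpa using ih ys (by omega) (by omega)
          · simp [pvLcp, hxy]


theorem pvLcp_append (cur last t : List Char) :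
    pvLcp cur last = min (pvLcp cur (last ++ t)) last.length := by
  induction cur generalizing last with
  | nil => simp [pvLcp_nil_left]
  | cons c cs ih =>
      cases last with
      | nil =>
          simp [pvLcp_nil_right]
      | cons l ls =>
          simp only [pvLcp, List.cons_append]
          by_cases h : c = l
          · simp only [h, if_true, List.length_cons]
            rw [ih ls]; omega
          · simp [h]


theorem pvLcp_prefix (cur last prev : List Char) (h : last.IsPrefix prev) :
    pvLcp cur last = min (pvLcp cur prev) last.length := by
  obtain ⟨t, rfl⟩ := h
  exact pvLcp_append cur last t


theorem pvLcp_prefix_right (a b : List Char) (h : pvLcp a b = b.length) : b.IsPrefix a := by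
  induction b generalizing a with
  | nil => exact List.nil_prefix
  | cons y ys ih =>
      cases a with
      | nil => simp [pvLcp_nil_left] at h
      | cons x xs =>
          simp only [pvLcp, List.length_cons] at h
          by_cases hxy : x = y
          · subst hxy
            simp only [if_true] at h
            exact List.cons_prefix_cons.mpr ⟨rfl, ih xs (by omega)⟩
          · simp [hxy] at h


theorem lex_prefix_lt : ∀ (b s : List Char), s ≠ [] → b < b ++ s := by
  intro b s hs
  induction b with
  | nil => cases s with | nil => exact absurd rfl hs | cons y ys => exact List.Lex.nil
  | cons x xs ih => exact List.Lex.cons ih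


theorem le_no_proper_prefix (a b : List Char) (hle : a ≤ b) (h : pvLcp a b = b.length)
    (hlen : b.length < a.length) : False := by
  obtain ⟨t, rfl⟩ := pvLcp_prefix_right a b h
  have ht : t ≠ [] := by rintro rfl; simp at hlen
  exact absurd (lt_of_le_of_lt hle (lex_prefix_lt b t ht)) (lt_irrefl _)


theorem pvMismatch_eq (a b : List Char) : ∀ j, j ≤ pvLcp a b →
    pvMismatch a b j = if pvLcp a b < min a.length b.length then some (pvLcp a b) else none := by
  intro j hj
  rw [pvMismatch]
  by_cases h : j < min a.length b.length
  · rw [dif_pos h]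
    rcases Nat.lt_or_ge j (pvLcp a b) with hlt | hge
    · rw [if_neg (by simpa using pvLcp_getD_eq a b j hlt)]
      exact pvMismatch_eq a b (j+1) (by omega)
    · have hj' : j = pvLcp a b := le_antisymm hj hge
      subst hj'
      rw [if_pos (pvLcp_getD_ne a b (by omega) (by omega)), if_pos (by omega)]
  · rw [dif_neg h]
    have h1 := pvLcp_le_left a b
    have h2 := pvLcp_le_right a b
    rw [if_neg (by omega)]
termination_by j => min a.length b.length - j
decreasing_by omega


theorem pvInner_eq (last cur next : List Char) (hlast : last ≠ []) (hnext : next ≠ []) :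
    ∀ j l r,
    (l = true ↔ (pvLcp cur last < j ∨ last.length ≤ j)) →
    (r = true ↔ (pvLcp cur next < j ∨ next.length ≤ j)) →
    j ≤ max (pvLcp cur last) (pvLcp cur next) →
    pvInner last cur next j l r =
      if max (pvLcp cur last) (pvLcp cur next) < cur.length
      then some (max (pvLcp cur last) (pvLcp cur next)) else none := by
  intro j l r hl hr hj
  have htpos : 0 < last.length := List.length_pos_iff.mpr hlast
  have hnpos : 0 < next.length := List.length_pos_iff.mpr hnext
  have hcl_le : pvLcp cur last ≤ last.length := pvLcp_le_right cur last
  have hcl_lec : pvLcp cur last ≤ cur.length := pvLcp_le_left cur last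
  have hcr_le : pvLcp cur next ≤ next.length := pvLcp_le_right cur next
  have hcr_lec : pvLcp cur next ≤ cur.length := pvLcp_le_left cur next
  rw [pvInner]
  by_cases hjc : j < cur.length
  · rw [dif_pos hjc]
    have hl1 : (if !l && decide (j < last.length) then
                  (if last.getD j ' ' ≠ cur.getD j ' ' then true else l) else l)
               = decide (pvLcp cur last ≤ j) := by
      cases l with
      | true =>
          have h := hl.mp rfl
          simp only [Bool.not_true, Bool.false_and, Bool.false_eq_true, if_false]
          symm; rw [decide_eq_true_eq]; omega
      | false =>
          have hnp : ¬(pvLcp cur last < j ∨ last.length ≤ j) := fun h => by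
            have := hl.mpr h; simp at this
          rw [Bool.not_false, Bool.true_and,
            if_pos (show decide (j < last.length) = true by simp only [decide_eq_true_eq]; omega)]
          rcases Nat.lt_or_ge j (pvLcp cur last) with hlt | hge
          · rw [if_neg (by simpa using (pvLcp_getD_eq cur last j hlt).symm)]
            symm; rw [decide_eq_false_iff_not]; omega
          · have hje : j = pvLcp cur last := by omega
            subst hje
            rw [if_pos (by simpa using (pvLcp_getD_ne cur last (by omega) (by omega)).symm)]
            symm; rw [decide_eq_true_eq]
    have hr1 : (if !r && decide (j < next.length) then
                  (if next.getD j ' ' ≠ cur.getD j ' ' then true else r) else r)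
               = decide (pvLcp cur next ≤ j) := by
      cases r with
      | true =>
          have h := hr.mp rfl
          simp only [Bool.not_true, Bool.false_and, Bool.false_eq_true, if_false]
          symm; rw [decide_eq_true_eq]; omega
      | false =>
          have hnp : ¬(pvLcp cur next < j ∨ next.length ≤ j) := fun h => by
            have := hr.mpr h; simp at this
          rw [Bool.not_false, Bool.true_and,
            if_pos (show decide (j < next.length) = true by simp only [decide_eq_true_eq]; omega)]
          rcases Nat.lt_or_ge j (pvLcp cur next) with hlt | hge
          · rw [if_neg (by simpa using (pvLcp_getD_eq cur next j hlt).symm)]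
            symm; rw [decide_eq_false_iff_not]; omega
          · have hje : j = pvLcp cur next := by omega
            subst hje
            rw [if_pos (by simpa using (pvLcp_getD_ne cur next (by omega) (by omega)).symm)]
            symm; rw [decide_eq_true_eq]
    simp only [hl1, hr1]
    by_cases hM : max (pvLcp cur last) (pvLcp cur next) ≤ j
    · have hje : j = max (pvLcp cur last) (pvLcp cur next) := by omega
      rw [if_pos (by simp; omega), if_pos (by omega)]
      exact congrArg some hje
    · rw [if_neg (by simp; omega)]
      exact pvInner_eq last cur next hlast hnext (j+1) _ _
        (by
          by_cases hjt : (j : Int) = (last.length : Int) - 1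
          · rw [if_pos hjt]; constructor
            · intro _; right; omega
            · intro _; rfl
          · rw [if_neg hjt]; rw [decide_eq_true_eq]; constructor
            · intro h; left; omega
            · intro h; rcases h with h | h
              · omega
              · have : last.length ≤ j := by omega
                omega)
        (by
          by_cases hjt : (j : Int) = (next.length : Int) - 1
          · rw [if_pos hjt]; constructor
            · intro _; right; omega
            · intro _; rfl
          · rw [if_neg hjt]; rw [decide_eq_true_eq]; constructor
            · intro h; left; omega
            · intro h; rcases h with h | h
              · omega
              · have : next.length ≤ j := by omega
                omega)
        (by omega)
  · rw [dif_neg hjc, if_neg (by omega)]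
termination_by j => cur.length - j
decreasing_by omega


theorem pvInner_zero (last cur next : List Char) (hlast : last ≠ []) (hnext : next ≠ []) :
    pvInner last cur next 0 false false =
      if max (pvLcp cur last) (pvLcp cur next) < cur.length
      then some (max (pvLcp cur last) (pvLcp cur next)) else none := by
  have htpos : 0 < last.length := List.length_pos_iff.mpr hlast
  have hnpos : 0 < next.length := List.length_pos_iff.mpr hnext
  exact pvInner_eq last cur next hlast hnext 0 false false
    (by constructor
        · intro h; simp at h
        · intro h; exfalso; omega)
    (by constructor
        · intro h; simp at h
        · intro h; exfalso; omega)
    (by omega)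


theorem pvFinal_eq (acc : Int) (prev last w : List Char) (hpre : last.IsPrefix prev)
    (hinv : min prev.length (1 + pvLcp prev w) ≤ last.length) :
    pvFinal acc last w = acc + (min w.length (1 + pvLcp w prev) : Nat) := by
  have hplen := hpre.length_le
  have hc1 : pvLcp w last = min (pvLcp w prev) last.length := pvLcp_prefix w last prev hpre
  have hcomm : pvLcp prev w = pvLcp w prev := pvLcp_comm prev w
  have hb1 : pvLcp w prev ≤ w.length := pvLcp_le_left w prev
  have hb2 : pvLcp w prev ≤ prev.length := pvLcp_le_right w prev
  have hb3 : pvLcp w last ≤ w.length := pvLcp_le_left w last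
  have hb4 : pvLcp w last ≤ last.length := pvLcp_le_right w last
  unfold pvFinal
  rw [pvMismatch_eq w last 0 (by omega)]
  by_cases hms : pvLcp w last < min w.length last.length
  · rw [if_pos hms]
    dsimp only
    have h3 : ((pvLcp w last : Int)) + 1 = ((min w.length (1 + pvLcp w prev) : Nat) : Int) := by
      push_cast; omega
    omega
  · rw [if_neg hms]
    dsimp only
    split_ifs with hlen
    · have : ((last.length : Int)) + 1 = ((min w.length (1 + pvLcp w prev) : Nat) : Int) := by
        push_cast; omega
      omega
    · have : ((w.length : Int)) = ((min w.length (1 + pvLcp w prev) : Nat) : Int) := by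
        push_cast; omega
      omega


theorem pvSum_cons_cons (prev cur next : List Char) (r : List (List Char)) :
    pvSum (some prev) (cur :: next :: r) =
      ((min cur.length (1 + max (pvLcp prev cur) (pvLcp cur next)) : Nat) : Int)
        + pvSum (some cur) (next :: r) := by
  rfl

theorem pvSum_single (prev w : List Char) :
    pvSum (some prev) [w] = ((min w.length (1 + pvLcp prev w) : Nat) : Int) := by
  show ((min w.length (1 + max (pvLcp prev w) 0) : Nat) : Int) + 0 = _
  rw [Nat.max_zero]
  ring

theorem lex_le_nil (a : List Char) (h : a ≤ []) : a = [] := by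
  cases a with
  | nil => rfl
  | cons x xs =>
      exact absurd (lt_of_lt_of_le (show ([]:List Char) < x::xs from List.Lex.nil) h) (lt_irrefl _)


theorem pvInner_nil_last (cur next : List Char) : ∀ j r, pvInner [] cur next j false r = none := by
  intro j r
  rw [pvInner]
  by_cases hj : j < cur.length
  · rw [dif_pos hj]
    simp only [List.length_nil, Bool.not_false, Bool.true_and, decide_eq_true_eq]
    rw [if_neg (by omega : ¬ j < 0)]
    simp only [Bool.false_and, if_neg (Bool.false_ne_true)]
    have h0 : ¬ ((j:Int) = ((0:ℕ):Int) - 1) := by omega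
    rw [if_neg h0]
    exact pvInner_nil_last cur next (j+1) _
  · rw [dif_neg hj]
termination_by j => cur.length - j
decreasing_by omega


theorem pvPreLcp_eq (a b : List Char) : pvPreLcp a b = pvLcp a b := by
  induction a generalizing b with
  | nil => cases b <;> simp [pvPreLcp, pvLcp]
  | cons x xs ih =>
      cases b with
      | nil => simp [pvPreLcp, pvLcp]
      | cons y ys =>
          by_cases h : x = y
          · simp [pvPreLcp, pvLcp, h, ← ih ys]
          · simp [pvPreLcp, pvLcp, h]


theorem pvMiddle_eq : ∀ (r : List (List Char)) (cur prev last : List Char) (acc : Int),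
    List.Pairwise (· ≤ ·) (prev :: cur :: r) →
    last.IsPrefix prev →
    min prev.length (1 + pvLcp prev cur) ≤ last.length →
    (prev = [] → pvOkB (cur :: r) = true) →
    pvFinal (pvMiddle last acc (cur :: r)).1 (pvMiddle last acc (cur :: r)).2.1
            (pvMiddle last acc (cur :: r)).2.2
      = acc + pvSum (some prev) (cur :: r) := by
  intro r
  induction r with
  | nil =>
      intro cur prev last acc hpw hpre hinv _
      show pvFinal acc last cur = _
      rw [pvFinal_eq acc prev last cur hpre hinv, pvSum_single, pvLcp_comm prev cur]
  | cons next r' ih =>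
      intro cur prev last acc hpw hpre hinv hok
      have hpw' : List.Pairwise (· ≤ ·) (cur :: next :: r') := (List.pairwise_cons.mp hpw).2
      by_cases hprev : prev = []
      · -- the previously typed prefix is empty
        subst hprev
        have hlast : last = [] := List.prefix_nil.mp hpre
        subst hlast
        have hok' : pvOkB (cur :: next :: r') = true := hok rfl
        by_cases hcur : cur = []
        · subst hcur
          have hstep : pvInner [] [] next 0 false false = none := by
            rw [pvInner]; simp
          rw [show pvMiddle [] acc ([] :: next :: r') =
                pvMiddle [] (acc + ((List.length ([] : List Char) : Nat) : Int)) (next :: r') by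
              rw [pvMiddle, hstep]]
          rw [ih next [] [] _ hpw' List.nil_prefix (by simp)
                (fun _ => by simpa [pvOkB] using hok')]
          rw [pvSum_cons_cons, pvLcp_nil_left]
          simp
        · -- first nonempty word with an empty predecessor: A types it in full, and under
          -- Pre_ (pvOkB) B's formula gives the full length as well
          have hstep : pvInner [] cur next 0 false false = none := pvInner_nil_last cur next 0 false
          rw [show pvMiddle [] acc (cur :: next :: r') =
                pvMiddle cur (acc + (cur.length : Int)) (next :: r') by
              rw [pvMiddle, hstep]]
          rw [ih next cur cur (acc + (cur.length : Int)) hpw' (List.prefix_refl cur)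
                (min_le_left _ _) (fun h => absurd h hcur)]
          rw [pvSum_cons_cons, pvLcp_nil_left]
          have hlen : cur.length ≤ 1 + pvLcp cur next := by
            have := hok'
            simp only [pvOkB, if_neg hcur, decide_eq_true_eq, pvPreLcp_eq] at this
            exact this
          have hmin : min cur.length (1 + max 0 (pvLcp cur next)) = cur.length := by
            simp only [Nat.zero_max]; omega
          rw [hmin]
          ring
      · -- the previous word is nonempty: every later word and the typed prefix are nonempty
        have hpc : prev ≤ cur := (List.pairwise_cons.mp hpw).1 cur (by simp)
        have hcn : cur ≤ next := (List.pairwise_cons.mp hpw').1 next (by simp)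
        have hppos : 0 < prev.length := List.length_pos_iff.mpr hprev
        have hlast : last ≠ [] := by
          intro h
          rw [h] at hinv
          simp only [List.length_nil, Nat.le_zero] at hinv
          omega
        have hcur : cur ≠ [] := fun h => hprev (lex_le_nil prev (h ▸ hpc))
        have hnext : next ≠ [] := fun h => hcur (lex_le_nil cur (h ▸ hcn))
        have hc1 : pvLcp cur last = min (pvLcp cur prev) last.length :=
          pvLcp_prefix cur last prev hpre
        have hcomm : pvLcp prev cur = pvLcp cur prev := pvLcp_comm prev cur
        have hb2 : pvLcp cur prev ≤ prev.length := pvLcp_le_right cur prev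
        have hplen := hpre.length_le
        have hEq : pvLcp cur last = pvLcp cur prev := by omega
        have hstep := pvInner_zero last cur next hlast hnext
        rw [hEq] at hstep
        have hb1 : pvLcp cur prev ≤ cur.length := pvLcp_le_left cur prev
        have hb3 : pvLcp cur next ≤ cur.length := pvLcp_le_left cur next
        have hcpos : 0 < cur.length := List.length_pos_iff.mpr hcur
        set M := max (pvLcp cur prev) (pvLcp cur next) with hM
        by_cases hMc : M < cur.length
        · rw [if_pos hMc] at hstep
          rw [show pvMiddle last acc (cur :: next :: r') =
                pvMiddle (cur.take (M+1)) (acc + ((M : Int) + 1)) (next :: r') by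
              rw [pvMiddle, hstep]]
          have hlen_take : (cur.take (M+1)).length = M+1 := by
            rw [List.length_take]; omega
          rw [ih next cur (cur.take (M+1)) (acc + ((M : Int) + 1)) hpw'
                (List.take_prefix _ _)
                (by rw [hlen_take]; omega)
                (fun h => absurd h hcur)]
          rw [pvSum_cons_cons]
          have : min cur.length (1 + max (pvLcp prev cur) (pvLcp cur next)) = M + 1 := by
            rw [hcomm]; omega
          rw [this]
          push_cast; ring
        · rw [if_neg hMc] at hstep
          rw [show pvMiddle last acc (cur :: next :: r') =
                pvMiddle cur (acc + (cur.length : Int)) (next :: r') by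
              rw [pvMiddle, hstep]]
          rw [ih next cur cur (acc + (cur.length : Int)) hpw' (List.prefix_refl cur)
                (min_le_left _ _) (fun h => absurd h hcur)]
          rw [pvSum_cons_cons]
          have : min cur.length (1 + max (pvLcp prev cur) (pvLcp cur next)) = cur.length := by
            rw [hcomm]; omega
          rw [this]
          ring

theorem solution_eq (words : List String) (hpre : Pre_solution words) :
    solution words = solution_alt words := by
  obtain ⟨hlen, hok⟩ := hpre
  unfold solution solution_alt
  rcases hx : (@PySem.List.sorted String (List Char) List.instLinearOrder.toLT LinearOrder.toDecidableLT words (fun w => w.toList) false).map String.toList with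
    _ | ⟨w0, _ | ⟨w1, rest⟩⟩
  · exfalso
    have : words.length = 0 := by
      have h := congrArg List.length hx
      simpa [PySem.List.length_sorted] using h
    omega
  · exfalso
    have : words.length = 1 := by
      have h := congrArg List.length hx
      simpa [PySem.List.length_sorted] using h
    omega
  · dsimp only
    rw [hx] at hok
    have hpw : List.Pairwise (· ≤ ·) (w0 :: w1 :: rest) := by
      rw [← hx]
      rw [List.pairwise_map]
      have := PySem.List.sorted_pairwise (xs := words) (key := fun w => w.toList)
      exact this
    have hle01 : w0 ≤ w1 := (List.pairwise_cons.mp hpw).1 w1 (by simp)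
    have hc0l : pvLcp w0 w1 ≤ w0.length := pvLcp_le_left w0 w1
    have hc0r : pvLcp w0 w1 ≤ w1.length := pvLcp_le_right w0 w1
    have hsum0 : pvSum none (w0 :: w1 :: rest)
        = ((min w0.length (1 + pvLcp w0 w1) : Nat) : Int) + pvSum (some w0) (w1 :: rest) := by
      show ((min w0.length (1 + max 0 (pvLcp w0 w1)) : Nat) : Int) + _ = _
      rw [Nat.zero_max]
    rw [hsum0]
    by_cases h0 : w0 = []
    · -- the smallest word is empty: A's first block types nothing and leaves last = ""
      subst h0
      have hok' : pvOkB (w1 :: rest) = true := hok rfl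
      have hms0 : pvMismatch [] w1 0 = none := by
        rw [pvMismatch]
        rw [dif_neg (by simp)]
      rw [hms0]
      dsimp only
      rw [if_neg (by simp)]
      dsimp only
      rw [pvMiddle_eq rest w1 [] [] _ hpw List.nil_prefix (by simp) (fun _ => hok')]
      simp [pvLcp_nil_left]
    · have h1ne : w1 ≠ [] := fun h => h0 (lex_le_nil w0 (h ▸ hle01))
      have h0pos : 0 < w0.length := List.length_pos_iff.mpr h0
      rw [pvMismatch_eq w0 w1 0 (by omega)]
      by_cases hms : pvLcp w0 w1 < min w0.length w1.length
      · rw [if_pos hms]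
        dsimp only
        have htake : (w0.take (pvLcp w0 w1 + 1)).length = pvLcp w0 w1 + 1 := by
          rw [List.length_take]; omega
        rw [pvMiddle_eq rest w1 w0 (w0.take (pvLcp w0 w1 + 1)) _ hpw (List.take_prefix _ _)
              (by rw [htake]; omega)
              (fun h => absurd h h0)]
        have hmin : min w0.length (1 + pvLcp w0 w1) = pvLcp w0 w1 + 1 := by omega
        rw [hmin]
        push_cast; ring
      · rw [if_neg hms]
        dsimp only
        have hlen2 : ¬ (w0.length > w1.length) := by
          intro hgt
          exact le_no_proper_prefix w0 w1 hle01 (by omega) hgt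
        rw [if_neg hlen2]
        dsimp only
        rw [pvMiddle_eq rest w1 w0 w0 _ hpw (List.prefix_refl w0) (min_le_left _ _)
              (fun h => absurd h h0)]
        have hmin : min w0.length (1 + pvLcp w0 w1) = w0.length := by omega
        rw [hmin]

-- ===== VERDICT (by name: the statement is the Claim_ definition above) =====
theorem solution_spec : Claim_equal_solution := by
  intro words _ hpre
  exact solution_eq words hpre
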